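-- pv_equiv track=rewrite | github.com/kcfkwok2003/tw_star_navigator | horo_TW/ap_httpd_planet.py | add_hline
-- ===== SOURCE A (Python) =====
-- BITMASK =  [0x01,0x02,0x04,0x08,0x10,0x20,0x40,0x80]
--
-- def add_hline(hb,lb,y):
--     hs ='<tr>'
--     x=0
--     for bm in BITMASK:
--         if (hb & bm):
--             hs+='<td><input type="radio" name="%x%x" checked></td>' % (x,y)
--         else:
--             hs+='<td><input type="radio" name="%x%x"></td>' % (x,y)
--         x+=1
--     for bm in BITMASK[:4]:
--         if (lb & bm):
--             hs+='<td><input type="radio" name="%x%x" checked></td>' % (x,y)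
--         else:
--             hs+='<td><input type="radio" name="%x%x"></td>' % (x,y)
--         x+=1
--     hs+="</tr>"
--     return hs
-- ===== SOURCE B (Python) =====
-- def add_hline(hb, lb, y):
--     def cells(x, v):
--         if x == 12:
--             return '</tr>'
--         attr = '' if v % 2 == 0 else ' checked'
--         return ('<td><input type="radio" name="%x%x"%s></td>' % (x, y, attr)
--                 + cells(x + 1, v // 2))
--     return '<tr>' + cells(0, (hb & 0xff) | ((lb & 0x0f) << 8))
-- ===== Notes on version B (the rewrite author's own statement) =====
-- stated objective: alternative
-- what changed: A's two staged iterative loops over an explicit 8-entry BITMASK table with string += are replaced by a recursive single pass that first packs both bytes into one value v = (hb & 0xff) | ((lb & 0x0f) << 8) and then consumes v by repeated divmod-by-2, the remainder deciding 'checked' and the quotient passed to the recursive call; the mask table disappears entirely.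
import Mathlib
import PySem

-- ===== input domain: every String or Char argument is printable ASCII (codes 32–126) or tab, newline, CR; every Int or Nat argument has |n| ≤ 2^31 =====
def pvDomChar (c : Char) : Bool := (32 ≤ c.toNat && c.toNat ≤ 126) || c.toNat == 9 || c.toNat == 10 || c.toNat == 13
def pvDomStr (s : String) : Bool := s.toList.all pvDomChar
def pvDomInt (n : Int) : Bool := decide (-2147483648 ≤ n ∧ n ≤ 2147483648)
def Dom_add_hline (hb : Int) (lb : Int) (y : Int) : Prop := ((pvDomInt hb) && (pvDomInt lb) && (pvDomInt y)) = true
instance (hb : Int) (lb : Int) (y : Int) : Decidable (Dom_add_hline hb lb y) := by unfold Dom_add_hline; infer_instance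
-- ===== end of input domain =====

-- B replaces A's two staged loops over the BITMASK table by a recursive single pass that
-- packs both bytes into one value and consumes it by repeated divmod-by-2 (objective:
-- alternative decomposition, same cost).

-- ===== PORT A =====
-- shared primitive: Python's '%x' formatting of an int (lowercase hex digits, '-' prefix);
-- fuel-structural recursion (fuel ≥ n suffices, called with fuel = n)
def hexDigit (d : Nat) : Char := if d < 10 then Char.ofNat (48 + d) else Char.ofNat (87 + d)

def hexNatAux : Nat → Nat → List Char
  | 0, _ => []
  | _, 0 => []
  | f+1, n => hexNatAux f (n / 16) ++ [hexDigit (n % 16)]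

def hexStr (n : Int) : String :=
  if n < 0 then "-" ++ String.ofList (hexNatAux (-n).toNat (-n).toNat)
  else if n = 0 then "0" else String.ofList (hexNatAux n.toNat n.toNat)

def BITMASK : List Int := [0x01,0x02,0x04,0x08,0x10,0x20,0x40,0x80]

def add_hline (hb : Int) (lb : Int) (y : Int) : String :=
  let hs := "<tr>"
  let p1 : String × Int := BITMASK.foldl (fun p bm =>
    (p.1 ++ (if PySem.Int.band hb bm ≠ 0 then
        "<td><input type=\"radio\" name=\"" ++ hexStr p.2 ++ hexStr y ++ "\" checked></td>"
      else
        "<td><input type=\"radio\" name=\"" ++ hexStr p.2 ++ hexStr y ++ "\"></td>"),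
     p.2 + 1)) (hs, 0)
  let p2 : String × Int := (PySem.List.slice BITMASK none (some 4)).foldl (fun p bm =>
    (p.1 ++ (if PySem.Int.band lb bm ≠ 0 then
        "<td><input type=\"radio\" name=\"" ++ hexStr p.2 ++ hexStr y ++ "\" checked></td>"
      else
        "<td><input type=\"radio\" name=\"" ++ hexStr p.2 ++ hexStr y ++ "\"></td>"),
     p.2 + 1)) p1
  p2.1 ++ "</tr>"

-- ===== PORT B =====
-- Python B's inner 'cells(x, v)' recursion, with x == 12 as the base case; ported with
-- structural fuel 12 - x (the fuel argument counts the remaining steps, x is carried along)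
def cellsB (y : Int) : Nat → Int → Int → String
  | 0, _, _ => "</tr>"
  | k+1, x, v =>
    ("<td><input type=\"radio\" name=\"" ++ hexStr x ++ hexStr y ++ "\"" ++
       (if PySem.Int.mod v 2 = 0 then "" else " checked") ++ "></td>")
      ++ cellsB y k (x + 1) (PySem.Int.floordiv v 2)

def add_hline_alt (hb : Int) (lb : Int) (y : Int) : String :=
  "<tr>" ++ cellsB y 12 0 (PySem.Int.bor (PySem.Int.band hb 0xff) (PySem.Int.band lb 0x0f <<< (8:Nat)))

-- ===== PRECONDITION & SPEC =====
def Spec_add_hline (hb : Int) (lb : Int) (y : Int) (out : String) : Prop := out = add_hline_alt hb lb y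
instance (hb : Int) (lb : Int) (y : Int) (out : String) : Decidable (Spec_add_hline hb lb y out) := by unfold Spec_add_hline; infer_instance

-- ===== CLAIM (what is proved, stated in full; the proofs are below) =====
def Claim_equal_add_hline : Prop := ∀ (hb : Int) (lb : Int) (y : Int), Dom_add_hline hb lb y → Spec_add_hline hb lb y (add_hline hb lb y)

-- ===== LEMMAS AND PROOFS =====
theorem natAndPow (m i : Nat) : m &&& 2^i = 2^i * (m / 2^i % 2) := by
  have h := Nat.and_two_pow m i
  have h2 : m.testBit i = (m / 2^i % 2 == 1) := by
    simp [Nat.testBit, Nat.shiftRight_eq_div_pow]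
  rw [h2] at h
  rcases Nat.mod_two_eq_zero_or_one (m / 2^i) with hc | hc
  · rw [hc] at h ⊢; simp at h; simp [h]
  · rw [hc] at h ⊢; simp at h; omega

theorem band_pow_ne (a : Int) (k : Nat) :
    (PySem.Int.band a (2^k) ≠ 0) ↔ a / 2^k % 2 = 1 := by
  have hP : 0 < 2^k := by positivity
  have hcast : ((2:Int)^k) = ((2^k : Nat) : Int) := by push_cast; ring
  by_cases h : 0 ≤ a
  · rw [hcast, PySem.Int.band_of_nonneg h (by positivity), Int.toNat_natCast, natAndPow]
    set d := a.toNat / 2^k with hd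
    have had : a / ((2^k : Nat) : Int) = ((d : Nat) : Int) := by
      rw [show a = ((a.toNat : Nat) : Int) by omega, ← Int.natCast_ediv, hd]
    rw [had]
    rcases Nat.mod_two_eq_zero_or_one d with hc | hc <;> rw [hc] <;> omega
  · have hneg : a < 0 := by omega
    simp only [PySem.Int.band, if_neg h, if_pos (by positivity : (0:Int) ≤ 2^k)]
    rw [hcast, Int.toNat_natCast, Nat.and_comm, natAndPow]
    set m := (-a - 1).toNat with hm
    have hma : a = -((m : Int) + 1) := by omega
    set q := m / 2^k with hq
    have hmqr : (m : Int) = ((2^k:Nat):Int) * (q:Int) + ((m % 2^k : Nat):Int) := by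
      exact_mod_cast (Nat.div_add_mod m (2^k)).symm
    have hb : ((m % 2^k : Nat) : Int) < ((2^k:Nat):Int) := by
      exact_mod_cast Nat.mod_lt m hP
    have hdiv : a / ((2^k : Nat) : Int) = -(q : Int) - 1 := by
      exact ((Int.ediv_emod_unique (q := -(q:Int) - 1)
          (r := ((2^k:Nat):Int) - 1 - ((m % 2^k : Nat):Int)) (by exact_mod_cast hP)).mpr
        ⟨by rw [hma]; linear_combination hmqr, by omega, by omega⟩).1
    rw [hdiv]
    rcases Nat.mod_two_eq_zero_or_one q with hc | hc <;> rw [hc] <;> omega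

theorem bit_iff (a : Int) (k : Nat) :
    (PySem.Int.band a (2^k) = 0) ↔ ¬ (a / 2^k % 2 = 1) := by
  have hA := band_pow_ne a k
  constructor
  · intro h hc; exact (hA.mpr hc) h
  · intro h; by_contra hc; exact h (hA.mp hc)

theorem band_255 (a : Int) : PySem.Int.band a 255 = a % 256 := by
  by_cases h : 0 ≤ a
  · rw [show (255:Int) = ((255:Nat):Int) by norm_num, PySem.Int.band_of_nonneg h (by norm_num),
      Int.toNat_natCast]
    have h1 : a.toNat &&& 255 = a.toNat % 256 := Nat.and_two_pow_sub_one_eq_mod a.toNat 8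
    rw [h1]; omega
  · simp only [PySem.Int.band, if_neg h, if_pos (by norm_num : (0:Int) ≤ 255)]
    have h1 : (255:Int).toNat = 255 := rfl
    rw [h1, Nat.and_comm]
    have h2 : (-a-1).toNat &&& 255 = (-a-1).toNat % 256 :=
      Nat.and_two_pow_sub_one_eq_mod (-a-1).toNat 8
    rw [h2]; omega

theorem band_15 (a : Int) : PySem.Int.band a 15 = a % 16 := by
  by_cases h : 0 ≤ a
  · rw [show (15:Int) = ((15:Nat):Int) by norm_num, PySem.Int.band_of_nonneg h (by norm_num),
      Int.toNat_natCast]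
    have h1 : a.toNat &&& 15 = a.toNat % 16 := Nat.and_two_pow_sub_one_eq_mod a.toNat 4
    rw [h1]; omega
  · simp only [PySem.Int.band, if_neg h, if_pos (by norm_num : (0:Int) ≤ 15)]
    have h1 : (15:Int).toNat = 15 := rfl
    rw [h1, Nat.and_comm]
    have h2 : (-a-1).toNat &&& 15 = (-a-1).toNat % 16 :=
      Nat.and_two_pow_sub_one_eq_mod (-a-1).toNat 4
    rw [h2]; omega

set_option maxRecDepth 4096 in
theorem natOrAdd : ∀ n : Fin 256, ∀ m : Fin 16, n.val ||| (m.val * 256) = n.val + 256 * m.val := by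
  decide

theorem vEq (hb lb : Int) :
    PySem.Int.bor (PySem.Int.band hb 255) (PySem.Int.band lb 15 <<< (8:Nat))
      = (((hb % 256).toNat + 256 * (lb % 16).toNat : Nat) : Int) := by
  rw [band_255, band_15]
  have hsl : (lb % 16) <<< (8:Nat) = (lb % 16) * 256 := by
    rw [Int.shiftLeft_eq]; norm_num
  rw [hsl, PySem.Int.bor_of_nonneg (by omega) (by omega)]
  have h1 : ((lb % 16) * 256).toNat = (lb % 16).toNat * 256 := by omega
  rw [h1, natOrAdd ⟨(hb % 256).toNat, by omega⟩ ⟨(lb % 16).toNat, by omega⟩]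

theorem fd2 (n : Nat) : PySem.Int.floordiv ((n : Nat) : Int) 2 = ((n / 2 : Nat) : Int) := by
  rw [PySem.Int.floordiv_eq_ediv_of_pos (by norm_num)]; omega

theorem md2 (n : Nat) : PySem.Int.mod ((n : Nat) : Int) 2 = ((n % 2 : Nat) : Int) := by
  rw [PySem.Int.mod_eq_emod_of_pos (by norm_num)]; omega

-- the 12 per-bit condition bridges, N := (hb % 256).toNat + 256 * (lb % 16).toNat
theorem bitB_0 (hb lb : Int) : (PySem.Int.band hb 1 = 0)
    = (((hb % 256).toNat + 256 * (lb % 16).toNat) % 2 = 0) := by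
  have h := bit_iff hb 0; norm_num at h; apply propext; rw [h]; omega
theorem bitB_1 (hb lb : Int) : (PySem.Int.band hb 2 = 0)
    = (((hb % 256).toNat + 256 * (lb % 16).toNat) / 2 % 2 = 0) := by
  have h := bit_iff hb 1; norm_num at h; apply propext; rw [h]; omega
theorem bitB_2 (hb lb : Int) : (PySem.Int.band hb 4 = 0)
    = (((hb % 256).toNat + 256 * (lb % 16).toNat) / 4 % 2 = 0) := by
  have h := bit_iff hb 2; norm_num at h; apply propext; rw [h]; omega
theorem bitB_3 (hb lb : Int) : (PySem.Int.band hb 8 = 0)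
    = (((hb % 256).toNat + 256 * (lb % 16).toNat) / 8 % 2 = 0) := by
  have h := bit_iff hb 3; norm_num at h; apply propext; rw [h]; omega
theorem bitB_4 (hb lb : Int) : (PySem.Int.band hb 16 = 0)
    = (((hb % 256).toNat + 256 * (lb % 16).toNat) / 16 % 2 = 0) := by
  have h := bit_iff hb 4; norm_num at h; apply propext; rw [h]; omega
theorem bitB_5 (hb lb : Int) : (PySem.Int.band hb 32 = 0)
    = (((hb % 256).toNat + 256 * (lb % 16).toNat) / 32 % 2 = 0) := by
  have h := bit_iff hb 5; norm_num at h; apply propext; rw [h]; omega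
theorem bitB_6 (hb lb : Int) : (PySem.Int.band hb 64 = 0)
    = (((hb % 256).toNat + 256 * (lb % 16).toNat) / 64 % 2 = 0) := by
  have h := bit_iff hb 6; norm_num at h; apply propext; rw [h]; omega
theorem bitB_7 (hb lb : Int) : (PySem.Int.band hb 128 = 0)
    = (((hb % 256).toNat + 256 * (lb % 16).toNat) / 128 % 2 = 0) := by
  have h := bit_iff hb 7; norm_num at h; apply propext; rw [h]; omega
theorem bitB_8 (hb lb : Int) : (PySem.Int.band lb 1 = 0)
    = (((hb % 256).toNat + 256 * (lb % 16).toNat) / 256 % 2 = 0) := by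
  have h := bit_iff lb 0; norm_num at h; apply propext; rw [h]; omega
theorem bitB_9 (hb lb : Int) : (PySem.Int.band lb 2 = 0)
    = (((hb % 256).toNat + 256 * (lb % 16).toNat) / 512 % 2 = 0) := by
  have h := bit_iff lb 1; norm_num at h; apply propext; rw [h]; omega
theorem bitB_10 (hb lb : Int) : (PySem.Int.band lb 4 = 0)
    = (((hb % 256).toNat + 256 * (lb % 16).toNat) / 1024 % 2 = 0) := by
  have h := bit_iff lb 2; norm_num at h; apply propext; rw [h]; omega
theorem bitB_11 (hb lb : Int) : (PySem.Int.band lb 8 = 0)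
    = (((hb % 256).toNat + 256 * (lb % 16).toNat) / 2048 % 2 = 0) := by
  have h := bit_iff lb 3; norm_num at h; apply propext; rw [h]; omega

theorem appIte (c : Prop) [Decidable c] (q a b : String) :
    (if c then q ++ a else q ++ b) = q ++ (if c then a else b) := by
  split_ifs <;> rfl

theorem cellSuffix (Q : String) (c : Prop) [Decidable c] :
    Q ++ (if c then "\"></td>" else "\" checked></td>")
      = ((Q ++ "\"") ++ (if c then "" else " checked")) ++ "></td>" := by
  split_ifs
  · rw [String.append_empty, String.append_assoc,
      show ("\"" ++ "></td>" : String) = "\"></td>" from by decide]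
  · rw [String.append_assoc, String.append_assoc,
      show ("\"" ++ (" checked" ++ "></td>") : String) = "\" checked></td>" from by decide]

-- ===== VERDICT (by name: the statement is the Claim_ definition above) =====
theorem add_hline_spec : Claim_equal_add_hline := by
  intro hb lb y _
  unfold Spec_add_hline
  have hslice : PySem.List.slice [1,2,4,8,16,32,64,128] none (some 4) = ([1,2,4,8] : List Int) := by decide
  simp only [add_hline, add_hline_alt, hslice, BITMASK, List.foldl, cellsB,
    vEq hb lb, fd2, md2, Nat.cast_eq_zero]
  norm_num [Nat.div_div_eq_div_mul]
  simp only [← bitB_0 hb lb, ← bitB_1 hb lb, ← bitB_2 hb lb, ← bitB_3 hb lb, ← bitB_4 hb lb,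
    ← bitB_5 hb lb, ← bitB_6 hb lb, ← bitB_7 hb lb, ← bitB_8 hb lb, ← bitB_9 hb lb,
    ← bitB_10 hb lb, ← bitB_11 hb lb]
  simp only [appIte, cellSuffix]
  simp only [String.append_assoc]
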